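-- pv_equiv track=rewrite | github.com/kryezleo/KRY | Carmichael Zahl/Carmichael.py | primfaktoren
-- ===== SOURCE A (Python) =====
-- def primfaktoren(n):
--     """Gibt die Liste der eindeutigen Primfaktoren zurück"""
--     faktoren = []
--     d = 2
--     temp_n = n
--     while d * d <= temp_n:
--         if temp_n % d == 0:
--             faktoren.append(d)
--             while temp_n % d == 0:
--                 temp_n //= d
--         d += 1
--     if temp_n > 1:
--         faktoren.append(temp_n)
--     return faktoren
-- ===== SOURCE B (Python) =====
-- def primfaktoren(n):
--     """Gibt die Liste der eindeutigen Primfaktoren zurück"""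
--     fac = []
--     m = n
--     d = 2
--     while d * d <= m:
--         if m % d == 0:
--             fac.append(d)
--             m //= d
--         else:
--             d += 1
--     if m > 1:
--         fac.append(m)
--     out = []
--     for p in fac:
--         if p not in out:
--             out.append(p)
--     return out
-- ===== Notes on version B (the rewrite author's own statement) =====
-- stated objective: alternative
-- what changed: B factors n with multiplicity in a single division loop (appending d on every successful division and advancing d only when it stops dividing) and then removes duplicates in a separate pass, instead of A's loop that appends each prime once and strips all its copies in a nested inner while-loop.
import Mathlib
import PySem

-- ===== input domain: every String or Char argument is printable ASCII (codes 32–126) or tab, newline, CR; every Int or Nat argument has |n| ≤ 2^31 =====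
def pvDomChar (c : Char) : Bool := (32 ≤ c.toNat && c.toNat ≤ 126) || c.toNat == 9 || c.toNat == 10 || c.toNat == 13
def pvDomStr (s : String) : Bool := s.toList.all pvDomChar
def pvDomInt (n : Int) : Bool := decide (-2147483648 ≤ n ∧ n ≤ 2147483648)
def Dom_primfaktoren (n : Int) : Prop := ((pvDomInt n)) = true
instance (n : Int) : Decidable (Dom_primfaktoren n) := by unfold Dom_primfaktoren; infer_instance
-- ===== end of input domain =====

-- B is an alternative decomposition: one division loop collecting prime factors WITH
-- multiplicity (advancing d only when it stops dividing), then a separate dedup pass;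
-- A appends each prime once and strips its copies in a nested inner while-loop.

lemma pvLtSq (d : Int) (hd : 2 ≤ d) : d < d * d := by
  have h := mul_lt_mul_of_pos_right (show (1:Int) < d by omega) (show (0:Int) < d by omega)
  omega

lemma pvEdivLt (m d : Int) (hm : 0 < m) (hd : 2 ≤ d) : m / d < m := by
  have h := mul_lt_mul_of_pos_left (show (1:Int) < d by omega) hm
  exact Int.ediv_lt_of_lt_mul (by omega) (by omega)

lemma pvDivOut_dec (d m : Int) (h : 2 ≤ d ∧ 0 < m ∧ PySem.Int.mod m d = 0) :
    (PySem.Int.floordiv m d).toNat < m.toNat := by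
  have h1 : PySem.Int.floordiv m d = m / d := PySem.Int.floordiv_eq_ediv_of_pos (by omega)
  have h2 : m / d < m := pvEdivLt m d h.2.1 h.1
  have h3 : 0 ≤ m / d := Int.ediv_nonneg (by omega) (by omega)
  omega

-- ===== PORT A =====
-- the inner 'while temp_n % d == 0: temp_n //= d' loop of A;
-- the '2 ≤ d' and '0 < m' guard conjuncts only make the recursion total (never false when reached)
def pvDivOut (d m : Int) : Int :=
  if h : 2 ≤ d ∧ 0 < m ∧ PySem.Int.mod m d = 0 then
    pvDivOut d (PySem.Int.floordiv m d)
  else m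
termination_by m.toNat
decreasing_by exact pvDivOut_dec d m h

lemma pvDivOut_le (d m : Int) : pvDivOut d m ≤ m := by
  induction m using pvDivOut.induct d with
  | case1 m h ih =>
    rw [pvDivOut, dif_pos h]
    have h1 : PySem.Int.floordiv m d = m / d := PySem.Int.floordiv_eq_ediv_of_pos (by omega)
    have h2 : m / d < m := pvEdivLt m d h.2.1 h.1
    omega
  | case2 m h => rw [pvDivOut, dif_neg h]

lemma pvDivOut_lt (d m : Int) (hd : 2 ≤ d) (hm : 0 < m)
    (hdvd : PySem.Int.mod m d = 0) : pvDivOut d m < m := by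
  rw [pvDivOut, dif_pos ⟨hd, hm, hdvd⟩]
  have h1 : PySem.Int.floordiv m d = m / d := PySem.Int.floordiv_eq_ediv_of_pos (by omega)
  have h2 : m / d < m := pvEdivLt m d hm hd
  have := pvDivOut_le d (PySem.Int.floordiv m d)
  omega

lemma pvLoopA_dec1 (d m : Int) (h : 2 ≤ d ∧ d * d ≤ m) (hmod : PySem.Int.mod m d = 0) :
    (pvDivOut d m - (d + 1)).toNat < (m - d).toNat := by
  have h3 := pvLtSq d h.1
  have h2 := pvDivOut_lt d m h.1 (by omega) hmod
  omega

lemma pvLoopA_dec2 (d m : Int) (h : 2 ≤ d ∧ d * d ≤ m) :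
    (m - (d + 1)).toNat < (m - d).toNat := by
  have h3 := pvLtSq d h.1
  omega

-- A's outer 'while d*d <= temp_n' loop, carrying (d, temp_n, faktoren);
-- the '2 ≤ d' guard conjunct only makes the recursion total (d starts at 2 and grows)
def pvLoopA (d m : Int) (acc : List Int) : List Int :=
  if h : 2 ≤ d ∧ d * d ≤ m then
    if PySem.Int.mod m d = 0 then
      pvLoopA (d + 1) (pvDivOut d m) (acc ++ [d])
    else
      pvLoopA (d + 1) m acc
  else
    if 1 < m then acc ++ [m] else acc
termination_by (m - d).toNat
decreasing_by
  · exact pvLoopA_dec1 d m h (by assumption)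
  · exact pvLoopA_dec2 d m h

def primfaktoren (n : Int) : List Int := pvLoopA 2 n []

-- ===== PORT B =====
lemma pvFacB_dec1 (d m : Int) (h : 2 ≤ d ∧ d * d ≤ m) :
    (2 * PySem.Int.floordiv m d - d).toNat < (2 * m - d).toNat := by
  have h4 : (2:Int) * 2 ≤ d * d := mul_le_mul h.1 h.1 (by omega) (by omega)
  have h1 : PySem.Int.floordiv m d = m / d := PySem.Int.floordiv_eq_ediv_of_pos (by omega)
  have h2 : m / d < m := pvEdivLt m d (by omega) h.1
  have h3 : 0 ≤ m / d := Int.ediv_nonneg (by omega) (by omega)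
  have h5 := pvLtSq d h.1
  omega

lemma pvFacB_dec2 (d m : Int) (h : 2 ≤ d ∧ d * d ≤ m) :
    (2 * m - (d + 1)).toNat < (2 * m - d).toNat := by
  have h5 := pvLtSq d h.1
  omega

-- Source B's single 'while d*d <= m' loop: on a successful division append d and divide once
-- (d unchanged), otherwise advance d; the '2 ≤ d' guard conjunct only makes it total
def pvFacB (d m : Int) (fac : List Int) : List Int :=
  if h : 2 ≤ d ∧ d * d ≤ m then
    if PySem.Int.mod m d = 0 then
      pvFacB d (PySem.Int.floordiv m d) (fac ++ [d])
    else
      pvFacB (d + 1) m fac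
  else
    if 1 < m then fac ++ [m] else fac
termination_by (2 * m - d).toNat
decreasing_by
  · exact pvFacB_dec1 d m h
  · exact pvFacB_dec2 d m h

-- Source B's second pass: 'for p in fac: if p not in out: out.append(p)'
def pvDedup (xs : List Int) (out : List Int) : List Int :=
  match xs with
  | [] => out
  | p :: rest => if p ∈ out then pvDedup rest out else pvDedup rest (out ++ [p])

def primfaktoren_alt (n : Int) : List Int := pvDedup (pvFacB 2 n []) []

-- ===== PRECONDITION & SPEC =====
def Spec_primfaktoren (n : Int) (out : List Int) : Prop := out = primfaktoren_alt n
instance (n : Int) (out : List Int) : Decidable (Spec_primfaktoren n out) := by unfold Spec_primfaktoren; infer_instance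

-- ===== CLAIM (what is proved, stated in full; the proofs are below) =====
def Claim_equal_primfaktoren : Prop := ∀ (n : Int), Dom_primfaktoren n → Spec_primfaktoren n (primfaktoren n)

-- ===== LEMMAS AND PROOFS =====

lemma pvPosFactor (d k : Int) (hd : 0 < d) (h : 0 < d * k) : 0 < k := by
  rcases lt_trichotomy k 0 with hk | hk | hk
  · exact absurd (mul_neg_of_pos_of_neg hd hk) (by omega)
  · subst hk; simp at h
  · exact hk

lemma pvDivOut_dvd (d m : Int) : pvDivOut d m ∣ m := by
  induction m using pvDivOut.induct d with
  | case1 m h ih =>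
    rw [pvDivOut, dif_pos h]
    refine dvd_trans ih ?_
    obtain ⟨k, hk⟩ := (PySem.Int.mod_eq_zero_iff_dvd m d).mp h.2.2
    have h1 : PySem.Int.floordiv m d = m / d := PySem.Int.floordiv_eq_ediv_of_pos (by omega)
    have h2 : m / d = k := by rw [hk]; exact Int.mul_ediv_cancel_left k (by omega)
    exact ⟨d, by rw [h1, h2, hk]; ring⟩
  | case2 m h =>
    rw [pvDivOut, dif_neg h]

lemma pvDivOut_not_dvd (d m : Int) (hd : 2 ≤ d) : 0 < m →
    PySem.Int.mod (pvDivOut d m) d ≠ 0 := by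
  induction m using pvDivOut.induct d with
  | case1 m h ih =>
    intro hm
    rw [pvDivOut, dif_pos h]
    obtain ⟨k, hk⟩ := (PySem.Int.mod_eq_zero_iff_dvd m d).mp h.2.2
    have hk0 : 0 < k := pvPosFactor d k (by omega) (by omega : 0 < d * k)
    have h1 : PySem.Int.floordiv m d = m / d := PySem.Int.floordiv_eq_ediv_of_pos (by omega)
    have h2 : m / d = k := by rw [hk]; exact Int.mul_ediv_cancel_left k (by omega)
    exact ih (by rw [h1, h2]; exact hk0)
  | case2 m h =>
    intro hm hc
    rw [pvDivOut, dif_neg h] at hc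
    exact h ⟨hd, hm, hc⟩

-- proof-side characterisation of the unique-prime-factor list: smallest divisor scan …
def pvScanB (d m : Int) : Option Int :=
  if h : 2 ≤ d ∧ d * d ≤ m then
    if PySem.Int.mod m d = 0 then some d else pvScanB (d + 1) m
  else none
termination_by (m - d).toNat
decreasing_by exact pvLoopA_dec2 d m h

lemma pvScanB_sound (m : Int) : ∀ (d e : Int), pvScanB d m = some e →
    2 ≤ e ∧ 0 < m ∧ PySem.Int.mod m e = 0 := by
  intro d
  induction d using pvScanB.induct m with
  | case1 d hg hmod =>
    intro e h
    rw [pvScanB, dif_pos hg, if_pos hmod] at h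
    obtain rfl : d = e := Option.some.inj h
    have h3 := pvLtSq d hg.1
    exact ⟨hg.1, by omega, hmod⟩
  | case2 d hg hmod ih =>
    intro e h
    rw [pvScanB, dif_pos hg, if_neg hmod] at h
    exact ih e h
  | case3 d hg =>
    intro e h
    rw [pvScanB, dif_neg hg] at h
    exact absurd h (by simp)

lemma pvFactorB_dec (m d : Int) (hs : pvScanB 2 m = some d) :
    (pvDivOut d m).toNat < m.toNat := by
  obtain ⟨h2, hm, hmod⟩ := pvScanB_sound m 2 d hs
  have := pvDivOut_lt d m h2 hm hmod
  omega

-- … then recursion on the quotient (proof-side intermediate, used by both directions)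
def pvFactorB (m : Int) : List Int :=
  if m ≤ 1 then []
  else
    match hs : pvScanB 2 m with
    | some d => d :: pvFactorB (pvDivOut d m)
    | none => [m]
termination_by m.toNat
decreasing_by exact pvFactorB_dec m d hs

lemma pvScanB_skip (m : Int) :
    ∀ (k : Nat) (e d : Int), 2 ≤ e → e ≤ d → (d - e).toNat = k →
      (∀ f, e ≤ f → f < d → PySem.Int.mod m f ≠ 0) →
      pvScanB e m = pvScanB d m := by
  intro k
  induction k with
  | zero =>
    intro e d he hed hk _
    obtain rfl : e = d := by omega
    rfl
  | succ k ih =>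
    intro e d he hed hk hf
    have hlt : e < d := by omega
    by_cases hee : e * e ≤ m
    · rw [pvScanB, dif_pos ⟨he, hee⟩, if_neg (hf e le_rfl hlt)]
      exact ih (e + 1) d (by omega) (by omega) (by omega)
        (fun f h1 h2 => hf f (by omega) h2)
    · rw [pvScanB, dif_neg (fun hc => hee hc.2)]
      rw [pvScanB, dif_neg ?_]
      intro hc
      have h3 := mul_le_mul (le_of_lt (by omega : e < d)) (le_of_lt (by omega : e < d)) (by omega : (0:Int) ≤ e) (by omega : (0:Int) ≤ d)
      exact hee (le_trans h3 hc.2)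

lemma pvFactorB_cons (d m : Int) (h : 2 ≤ d ∧ d * d ≤ m)
    (hmod : PySem.Int.mod m d = 0)
    (hns : ∀ f, 2 ≤ f → f < d → PySem.Int.mod m f ≠ 0) :
    pvFactorB m = d :: pvFactorB (pvDivOut d m) := by
  have h3 := pvLtSq d h.1
  rw [pvFactorB, if_neg (by omega : ¬ m ≤ 1)]
  have hscan : pvScanB 2 m = some d := by
    rw [pvScanB_skip m (d - 2).toNat 2 d (by omega) (by omega) rfl
      (fun f h1 h2 => hns f h1 h2)]
    rw [pvScanB, dif_pos h, if_pos hmod]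
  split
  · next e hs => rw [hscan] at hs; cases hs; rfl
  · next hs => rw [hscan] at hs; cases hs

lemma pvFactorB_prime (d m : Int) (hd : 2 ≤ d) (hm1 : 1 < m) (hlt : m < d * d)
    (hns : ∀ f, 2 ≤ f → f < d → PySem.Int.mod m f ≠ 0) :
    pvFactorB m = [m] := by
  rw [pvFactorB, if_neg (by omega)]
  have hscan : pvScanB 2 m = none := by
    rw [pvScanB_skip m (d - 2).toNat 2 d (by omega) (by omega) rfl
      (fun f h1 h2 => hns f h1 h2)]
    rw [pvScanB, dif_neg (fun hc => absurd hlt (not_lt.mpr hc.2))]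
  split
  · next e hs => rw [hscan] at hs; cases hs
  · rfl

lemma pvLoopA_eq : ∀ (d m : Int) (acc : List Int), 2 ≤ d →
    (∀ f, 2 ≤ f → f < d → PySem.Int.mod m f ≠ 0) →
    pvLoopA d m acc = acc ++ pvFactorB m := by
  intro d m acc
  induction d, m, acc using pvLoopA.induct with
  | case1 d m acc h hmod ih =>
    intro hd hns
    have h3 := pvLtSq d h.1
    have hm : 0 < m := by omega
    have hq2 : pvDivOut d m ∣ m := pvDivOut_dvd d m
    rw [pvLoopA, dif_pos h, if_pos hmod]
    rw [ih (by omega) ?side]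
    case side =>
      intro f hf2 hfd
      rcases lt_or_eq_of_le (by omega : f ≤ d) with hfd' | rfl
      · intro hc
        exact hns f hf2 hfd'
          ((PySem.Int.mod_eq_zero_iff_dvd m f).mpr
            (dvd_trans ((PySem.Int.mod_eq_zero_iff_dvd _ f).mp hc) hq2))
      · exact pvDivOut_not_dvd f m h.1 hm
    rw [pvFactorB_cons d m h hmod hns]
    simp
  | case2 d m acc h hmod ih =>
    intro hd hns
    rw [pvLoopA, dif_pos h, if_neg hmod]
    refine ih (by omega) ?_
    intro f hf2 hfd
    rcases lt_or_eq_of_le (by omega : f ≤ d) with hfd' | rfl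
    · exact hns f hf2 hfd'
    · exact hmod
  | case3 d m acc h hm1 =>
    intro hd hns
    have hlt : m < d * d := by
      by_contra hc
      exact h ⟨hd, by omega⟩
    rw [pvLoopA, dif_neg h, if_pos hm1, pvFactorB_prime d m hd hm1 hlt hns]
  | case4 d m acc h hm1 =>
    intro hd hns
    rw [pvLoopA, dif_neg h, if_neg hm1, pvFactorB, if_pos (by omega)]
    simp

-- accumulator lemma for B's factor loop
lemma pvFacB_acc (k : Nat) : ∀ (d m : Int) (fac : List Int), (2 * m - d).toNat = k →
    pvFacB d m fac = fac ++ pvFacB d m [] := by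
  induction k using Nat.strong_induction_on with
  | _ k ih =>
    intro d m fac hk
    by_cases h : 2 ≤ d ∧ d * d ≤ m
    · by_cases hmod : PySem.Int.mod m d = 0
      · have hdec := pvFacB_dec1 d m h
        conv_lhs => rw [pvFacB]
        conv_rhs => rw [pvFacB]
        rw [dif_pos h, if_pos hmod, dif_pos h, if_pos hmod]
        rw [ih _ (by omega) d (PySem.Int.floordiv m d) (fac ++ [d]) rfl,
            ih _ (by omega) d (PySem.Int.floordiv m d) ([] ++ [d]) rfl]
        simp
      · have hdec := pvFacB_dec2 d m h
        conv_lhs => rw [pvFacB]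
        conv_rhs => rw [pvFacB]
        rw [dif_pos h, if_neg hmod, dif_pos h, if_neg hmod]
        exact ih _ (by omega) (d + 1) m fac rfl
    · conv_lhs => rw [pvFacB]
      conv_rhs => rw [pvFacB]
      rw [dif_neg h, dif_neg h]
      split <;> simp

-- main invariant: dedup over B's multiplicity list equals the unique-prime recursion.
-- Conjunct 1: out holds only numbers < d (fresh phase); conjunct 2: d itself was just
-- added to out (inside the division chain for d).
lemma pvZW (k : Nat) : ∀ (d m : Int) (out : List Int), (2 * m - d).toNat = k →
    2 ≤ d → (∀ f, 2 ≤ f → f < d → PySem.Int.mod m f ≠ 0) →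
    ((∀ x ∈ out, x < d) → pvDedup (pvFacB d m []) out = out ++ pvFactorB m)
    ∧ (0 < m → (∀ x ∈ out, x ≤ d) → d ∈ out →
        pvDedup (pvFacB d m []) out = out ++ pvFactorB (pvDivOut d m)) := by
  induction k using Nat.strong_induction_on with
  | _ k ih =>
    intro d m out hk hd hns
    have hdsq := pvLtSq d hd
    by_cases hdd : d * d ≤ m
    · have h : 2 ≤ d ∧ d * d ≤ m := ⟨hd, hdd⟩
      have hm4 : 4 ≤ m := by
        have h4 : (2:Int) * 2 ≤ d * d := mul_le_mul hd hd (by omega) (by omega)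
        omega
      by_cases hmod : PySem.Int.mod m d = 0
      · -- division step: B emits d and recurses on the quotient at the same d
        set q := PySem.Int.floordiv m d with hqdef
        have h1 : q = m / d := PySem.Int.floordiv_eq_ediv_of_pos (by omega)
        obtain ⟨c, hc⟩ := (PySem.Int.mod_eq_zero_iff_dvd m d).mp hmod
        have hceq : m / d = c := by rw [hc]; exact Int.mul_ediv_cancel_left c (by omega)
        have hq_pos : 0 < q := by
          have := pvPosFactor d c (by omega) (by omega : 0 < d * c)
          omega
        have hq_dvd : q ∣ m := ⟨d, by rw [h1, hceq, hc]; ring⟩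
        have hnsq : ∀ f, 2 ≤ f → f < d → PySem.Int.mod q f ≠ 0 := by
          intro f hf2 hfd hcq
          exact hns f hf2 hfd ((PySem.Int.mod_eq_zero_iff_dvd m f).mpr
            (dvd_trans ((PySem.Int.mod_eq_zero_iff_dvd q f).mp hcq) hq_dvd))
        have hdec := pvFacB_dec1 d m h
        have hSdm : pvFacB d m [] = d :: pvFacB d q [] := by
          conv_lhs => rw [pvFacB]
          rw [dif_pos h, if_pos hmod]
          rw [pvFacB_acc (2 * q - d).toNat d q ([] ++ [d]) rfl]
          simp
        have hdiv : pvDivOut d m = pvDivOut d q := by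
          conv_lhs => rw [pvDivOut]
          rw [dif_pos ⟨hd, by omega, hmod⟩]
        have hfb : pvFactorB m = d :: pvFactorB (pvDivOut d q) := by
          rw [pvFactorB_cons d m h hmod hns, hdiv]
        constructor
        · intro hout
          have hdnot : d ∉ out := fun hmem => absurd (hout d hmem) (lt_irrefl d)
          rw [hSdm]
          show pvDedup (d :: pvFacB d q []) out = out ++ pvFactorB m
          rw [pvDedup, if_neg hdnot]
          rw [(ih _ (by omega) d q (out ++ [d]) rfl hd hnsq).2 hq_pos
            (by intro x hx; rcases List.mem_append.mp hx with h' | h'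
                · exact le_of_lt (hout x h')
                · simp at h'; omega)
            (by simp)]
          rw [hfb]
          simp
        · intro hm hout hdin
          rw [hSdm]
          show pvDedup (d :: pvFacB d q []) out = out ++ pvFactorB (pvDivOut d m)
          rw [pvDedup, if_pos hdin]
          rw [(ih _ (by omega) d q out rfl hd hnsq).2 hq_pos hout hdin, hdiv]
      · -- no division: both sides advance to d + 1
        have hdec := pvFacB_dec2 d m h
        have hSdm : pvFacB d m [] = pvFacB (d + 1) m [] := by
          conv_lhs => rw [pvFacB]
          rw [dif_pos h, if_neg hmod]
        have hns' : ∀ f, 2 ≤ f → f < d + 1 → PySem.Int.mod m f ≠ 0 := by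
          intro f hf2 hfd
          rcases lt_or_eq_of_le (by omega : f ≤ d) with hfd' | rfl
          · exact hns f hf2 hfd'
          · exact hmod
        constructor
        · intro hout
          rw [hSdm]
          exact (ih _ (by omega) (d + 1) m out rfl (by omega) hns').1
            (fun x hx => by have := hout x hx; omega)
        · intro hm hout hdin
          rw [hSdm]
          have hdiv : pvDivOut d m = m := by
            rw [pvDivOut, dif_neg (fun hc => hmod hc.2.2)]
          rw [hdiv]
          exact (ih _ (by omega) (d + 1) m out rfl (by omega) hns').1
            (fun x hx => by have := hout x hx; omega)
    · -- loop exits: m < d*d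
      have hlt : m < d * d := by omega
      by_cases hm1 : 1 < m
      · have hmd : d ≤ m := by
          by_contra hc
          exact hns m (by omega) (by omega)
            ((PySem.Int.mod_eq_zero_iff_dvd m m).mpr dvd_rfl)
        have hSdm : pvFacB d m [] = [m] := by
          rw [pvFacB, dif_neg (fun hc => absurd hlt (not_lt.mpr hc.2)), if_pos hm1]
          rfl
        have hfb : pvFactorB m = [m] := pvFactorB_prime d m hd hm1 hlt hns
        constructor
        · intro hout
          have hnot : m ∉ out := fun hmem => absurd (hout m hmem) (by omega)
          rw [hSdm]
          show pvDedup [m] out = out ++ pvFactorB m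
          rw [pvDedup, if_neg hnot, pvDedup, hfb]
        · intro hm hout hdin
          by_cases hmodd : PySem.Int.mod m d = 0
          · -- here necessarily m = d (any proper cofactor would be a divisor < d)
            obtain ⟨c, hc⟩ := (PySem.Int.mod_eq_zero_iff_dvd m d).mp hmodd
            have hc_pos : 0 < c := pvPosFactor d c (by omega) (by omega : 0 < d * c)
            have hcd : c < d := by
              by_contra hcge
              have := mul_le_mul (le_refl d) (by omega : d ≤ c) (by omega) (by omega : (0:Int) ≤ d)
              omega
            have hmeq : m = d := by
              rcases lt_or_eq_of_le (by omega : 1 ≤ c) with hc2 | rfl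
              · exact absurd ((PySem.Int.mod_eq_zero_iff_dvd m c).mpr ⟨d, by rw [hc]; ring⟩)
                  (hns c (by omega) hcd)
              · omega
            subst hmeq
            rw [hSdm]
            show pvDedup [m] out = out ++ pvFactorB (pvDivOut m m)
            rw [pvDedup, if_pos hdin, pvDedup]
            have hfd1 : PySem.Int.floordiv m m = 1 := by
              rw [PySem.Int.floordiv_eq_ediv_of_pos (by omega)]
              exact Int.ediv_self (by omega)
            have hdiv1 : pvDivOut m m = 1 := by
              rw [pvDivOut, dif_pos ⟨hd, by omega, hmodd⟩, hfd1, pvDivOut,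
                dif_neg ?_, ]
              intro hc1
              have := Int.le_of_dvd one_pos ((PySem.Int.mod_eq_zero_iff_dvd 1 m).mp hc1.2.2)
              omega
            rw [hdiv1, pvFactorB, if_pos (by omega)]
            simp
          · have hdiv : pvDivOut d m = m := by
              rw [pvDivOut, dif_neg (fun hc => hmodd hc.2.2)]
            have hne : m ≠ d := fun hc => hmodd (by
              rw [hc]; exact (PySem.Int.mod_eq_zero_iff_dvd d d).mpr dvd_rfl)
            have hnot : m ∉ out := fun hmem => by
              have := hout m hmem; omega
            rw [hSdm]
            show pvDedup [m] out = out ++ pvFactorB (pvDivOut d m)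
            rw [pvDedup, if_neg hnot, pvDedup, hdiv, hfb]
      · -- m ≤ 1: B's loop emits nothing
        have hSdm : pvFacB d m [] = [] := by
          rw [pvFacB, dif_neg (fun hc => absurd hlt (not_lt.mpr hc.2)), if_neg hm1]
        have hfb0 : pvFactorB m = [] := by rw [pvFactorB, if_pos (by omega)]
        constructor
        · intro hout
          rw [hSdm, pvDedup, hfb0]
          simp
        · intro hm hout hdin
          have hmeq : m = 1 := by omega
          subst hmeq
          have hdiv : pvDivOut d 1 = 1 := by
            rw [pvDivOut, dif_neg ?_]
            intro hc1
            have := Int.le_of_dvd one_pos ((PySem.Int.mod_eq_zero_iff_dvd 1 d).mp hc1.2.2)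
            omega
          rw [hSdm, pvDedup, hdiv, hfb0]
          simp

-- ===== VERDICT (by name: the statement is the Claim_ definition above) =====
theorem primfaktoren_spec : Claim_equal_primfaktoren := by
  intro n _
  show pvLoopA 2 n [] = pvDedup (pvFacB 2 n []) []
  have hA := pvLoopA_eq 2 n [] (by omega) (fun f h1 h2 => absurd h2 (by omega))
  have hB := (pvZW (2 * n - 2).toNat 2 n [] rfl (by omega)
    (fun f h1 h2 => absurd h2 (by omega))).1 (by intro x hx; simp at hx)
  rw [hA, hB]
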